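-- pv_equiv track=rewrite | github.com/miliar/Code_Jam_Webscraper | solutions_python/solutions_year17_round0_nr2/1472.py | greatestTidyNumberLte
-- ===== SOURCE A (Python) =====
-- def greatestTidyNumberLte(s):
--     digits = [int(x) for x in s]
--     maxVal = maxIdx = -1
--     for i, v in enumerate(digits):
--         if v > maxVal:
--             maxVal = v
--             maxIdx = i
--         elif v < maxVal:
--             return decrementDigitsAtIdx(digits, maxIdx)
--     return s
--
-- def decrementDigitsAtIdx(digits, idx):
--     digits[idx] -= 1
--     for i, v in enumerate(digits[idx + 1:], idx + 1):
--         digits[i] = 9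
--     return "".join(str(x) for x in digits).lstrip("0")
-- ===== SOURCE B (Python) =====
-- def greatestTidyNumberLte(s):
--     digits = [int(x) for x in s]
--     mark = len(digits)
--     for i in range(len(digits) - 1, 0, -1):
--         if digits[i - 1] > digits[i]:
--             digits[i - 1] -= 1
--             mark = i
--     if mark == len(digits):
--         return s
--     tidy = digits[:mark] + [9] * (len(digits) - mark)
--     return "".join(str(x) for x in tidy).lstrip("0")
-- ===== Notes on version B (the rewrite author's own statement) =====
-- stated objective: idiomatic
-- what changed: Replaces A's forward scan tracking a running maximum and its plateau-start index (with an early return from inside the loop) by the standard right-to-left pass that decrements a digit at each local descent and 9-fills from the last decrement mark.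
import Mathlib
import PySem

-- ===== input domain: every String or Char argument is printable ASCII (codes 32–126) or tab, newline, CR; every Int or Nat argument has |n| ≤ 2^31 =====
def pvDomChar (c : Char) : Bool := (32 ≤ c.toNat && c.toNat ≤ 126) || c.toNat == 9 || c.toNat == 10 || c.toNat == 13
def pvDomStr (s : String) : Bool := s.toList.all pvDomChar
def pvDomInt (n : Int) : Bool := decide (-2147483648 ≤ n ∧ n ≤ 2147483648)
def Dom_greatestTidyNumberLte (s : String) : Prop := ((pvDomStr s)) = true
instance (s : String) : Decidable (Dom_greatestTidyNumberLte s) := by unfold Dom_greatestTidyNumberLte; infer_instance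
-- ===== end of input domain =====

-- B replaces A's forward running-maximum scan by the standard right-to-left descent pass; equal output proved on digit strings (Pre_).

-- int(x) for a one-character string x (exact where Python returns; Pre_ admits only digit characters)
def pyDigit (c : Char) : Int := (PySem.Int.ofChars? [c]).getD 0

-- "".join(str(x) for x in ds).lstrip("0") — join of str(x) is concatenation; lstrip("0") drops leading '0's (exact)
def renderDigits (ds : List Int) : String :=
  String.ofList (List.dropWhile (· == '0') (ds.flatMap PySem.Int.toChars))

-- ===== PORT A =====
def decrementDigitsAtIdx (digits : List Int) (idx : Int) : String :=
  let d1 := PySem.List.pySetD digits idx ((PySem.List.pyGetD digits idx 0) - 1)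
  let d2 := (PySem.List.enumerate (PySem.List.slice d1 (some (idx + 1)) none) (idx + 1)).foldl
      (fun d iv => PySem.List.pySetD d iv.1 9) d1
  renderDigits d2

def aGo (l : List (Int × Int)) (maxVal maxIdx : Int) (digits : List Int) : Option String :=
  match l with
  | [] => none
  | (i, v) :: rest =>
    if v > maxVal then aGo rest v i digits
    else if v < maxVal then some (decrementDigitsAtIdx digits maxIdx)
    else aGo rest maxVal maxIdx digits

def greatestTidyNumberLte (s : String) : String :=
  let digits := s.toList.map pyDigit
  match aGo (PySem.List.enumerate digits 0) (-1) (-1) digits with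
  | some r => r
  | none => s

-- ===== PORT B =====
def bStep (st : List Int × Int) (i : Int) : List Int × Int :=
  if PySem.List.pyGetD st.1 (i - 1) 0 > PySem.List.pyGetD st.1 i 0 then
    (PySem.List.pySetD st.1 (i - 1) ((PySem.List.pyGetD st.1 (i - 1) 0) - 1), i)
  else st

def greatestTidyNumberLte_alt (s : String) : String :=
  let digits := s.toList.map pyDigit
  let n : Int := digits.length
  let res := (PySem.List.pyRange (n - 1) 0 (-1)).foldl bStep (digits, n)
  if res.2 = n then s
  else renderDigits (PySem.List.slice res.1 none (some res.2) ++ List.replicate (n - res.2).toNat 9)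

-- ===== PRECONDITION & SPEC =====
-- Pre_ excludes exactly the strings containing a non-digit character, on which A raises ValueError at int(x).
def Pre_greatestTidyNumberLte (s : String) : Prop := (s.toList.all Char.isDigit) = true
instance (s : String) : Decidable (Pre_greatestTidyNumberLte s) := by unfold Pre_greatestTidyNumberLte; infer_instance
def pvWitness_greatestTidyNumberLte : String := "100"

def Spec_greatestTidyNumberLte (s : String) (out : String) : Prop := out = greatestTidyNumberLte_alt s
instance (s : String) (out : String) : Decidable (Spec_greatestTidyNumberLte s out) := by unfold Spec_greatestTidyNumberLte; infer_instance

-- ===== CLAIM (what is proved, stated in full; the proofs are below) =====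
def Claim_equal_greatestTidyNumberLte : Prop := ∀ (s : String), Dom_greatestTidyNumberLte s → Pre_greatestTidyNumberLte s → Spec_greatestTidyNumberLte s (greatestTidyNumberLte s)

-- ===== LEMMAS AND PROOFS =====
theorem bStep_eq (d : List Int) (mk i : Int) (h : 1 ≤ i) :
    bStep (d, mk) i =
      if d.getD i.toNat 0 < d.getD (i.toNat - 1) 0 then
        (d.set (i.toNat - 1) (d.getD (i.toNat - 1) 0 - 1), i)
      else (d, mk) := by
  obtain ⟨nn, rfl⟩ : ∃ nn : Nat, i = (nn : Int) := ⟨i.toNat, by omega⟩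
  have h1 : (nn : Int) - 1 = ((nn - 1 : Nat) : Int) := by omega
  simp only [bStep, h1, PySem.List.pyGetD_natCast, PySem.List.pySetD_natCast, Int.toNat_natCast,
    gt_iff_lt]

theorem pyRange_neg_one_append (a m b : Int) (h1 : b ≤ m) (h2 : m ≤ a) :
    PySem.List.pyRange a b (-1) = PySem.List.pyRange a m (-1) ++ PySem.List.pyRange m b (-1) := by
  rw [PySem.List.pyRange_neg_one_eq_reverse a b, PySem.List.pyRange_neg_one_eq_reverse a m,
    PySem.List.pyRange_neg_one_eq_reverse m b, ← List.reverse_append,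
    ← PySem.List.pyRange_one_append (b + 1) (m + 1) (a + 1) (by omega) (by omega)]

theorem phaseC : ∀ (p : Nat) (d : List Int) (mk : Int),
    (∀ q : Nat, q + 1 ≤ p → d.getD q 0 ≤ d.getD (q + 1) 0) →
    (PySem.List.pyRange ((p : Nat) : Int) 0 (-1)).foldl bStep (d, mk) = (d, mk) := by
  intro p
  induction p with
  | zero => intro d mk _; rw [PySem.List.pyRange_neg_one_eq_nil (by omega)]; rfl
  | succ q ih =>
    intro d mk hh
    rw [PySem.List.pyRange_neg_one_cons (by omega), List.foldl_cons,
      bStep_eq d mk _ (by omega)]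
    have e1 : ((q + 1 : Nat) : Int).toNat = q + 1 := by omega
    rw [e1]
    simp only [Nat.add_sub_cancel]
    rw [if_neg (by have := hh q (by omega); omega)]
    have e2 : ((q + 1 : Nat) : Int) - 1 = ((q : Nat) : Int) := by omega
    rw [e2]
    exact ih d mk (fun r hr => hh r (by omega))

theorem chain'_getD (a : List Int) (h : List.IsChain (· ≤ ·) a) (q : Nat) (hq : q + 1 < a.length) :
    a.getD q 0 ≤ a.getD (q + 1) 0 := by
  rw [List.getD_eq_getElem a 0 (by omega), List.getD_eq_getElem a 0 hq]
  exact List.isChain_iff_getElem.mp h q (by omega)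

theorem aGo_no_descent : ∀ (l : List Int) (i mV mI : Int) (digits : List Int),
    List.IsChain (· ≤ ·) (mV :: l) →
    aGo (PySem.List.enumerate l i) mV mI digits = none := by
  intro l
  induction l with
  | nil => intro i mV mI digits _; simp [PySem.List.enumerate_nil, aGo]
  | cons x t ih =>
    intro i mV mI digits hch
    rw [List.isChain_cons_cons] at hch
    rw [PySem.List.enumerate_cons]
    simp only [aGo]
    rcases lt_or_eq_of_le hch.1 with hlt | heq
    · rw [if_pos (by omega)]
      exact ih (i + 1) x i digits hch.2
    · rw [if_neg (by omega), if_neg (by omega)]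
      exact ih (i + 1) mV mI digits (heq ▸ hch.2)

theorem aGo_prefix : ∀ (a : List Int) (i mV mI : Int) (digits : List Int) (L : List (Int × Int)),
    List.IsChain (· ≤ ·) (mV :: a) →
    ∃ mV' mI', aGo (PySem.List.enumerate a i ++ L) mV mI digits = aGo L mV' mI' digits ∧
      mV' ∈ mV :: a := by
  intro a
  induction a with
  | nil =>
    intro i mV mI digits L _
    exact ⟨mV, mI, by simp [PySem.List.enumerate_nil], List.mem_cons_self⟩
  | cons x t ih =>
    intro i mV mI digits L hch
    rw [List.isChain_cons_cons] at hch
    rw [PySem.List.enumerate_cons, List.cons_append]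
    simp only [aGo]
    rcases lt_or_eq_of_le hch.1 with hlt | heq
    · rw [if_pos (by omega)]
      obtain ⟨mV', mI', heq', hmem⟩ := ih (i + 1) x i digits L hch.2
      exact ⟨mV', mI', heq', by simp [List.mem_cons] at hmem ⊢; tauto⟩
    · rw [if_neg (by omega), if_neg (by omega)]
      obtain ⟨mV', mI', heq', hmem⟩ := ih (i + 1) mV mI digits L (heq ▸ hch.2)
      exact ⟨mV', mI', heq', by simp [List.mem_cons] at hmem ⊢; tauto⟩

theorem aGo_run_eq : ∀ (k : Nat) (v w : Int) (u : List Int) (i mI : Int) (digits : List Int),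
    w < v →
    aGo (PySem.List.enumerate (List.replicate k v ++ w :: u) i) v mI digits
      = some (decrementDigitsAtIdx digits mI) := by
  intro k
  induction k with
  | zero =>
    intro v w u i mI digits hwv
    simp only [List.replicate, List.nil_append, PySem.List.enumerate_cons, aGo]
    rw [if_neg (by omega), if_pos (by omega)]
  | succ q ih =>
    intro v w u i mI digits hwv
    rw [List.replicate_succ, List.cons_append, PySem.List.enumerate_cons]
    simp only [aGo]
    rw [if_neg (by omega), if_neg (by omega)]
    exact ih v w u (i + 1) mI digits hwv

theorem aGo_run : ∀ (k : Nat) (v w mV : Int) (u : List Int) (i mI : Int) (digits : List Int),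
    mV < v → w < v →
    aGo (PySem.List.enumerate (List.replicate (k + 1) v ++ w :: u) i) mV mI digits
      = some (decrementDigitsAtIdx digits i) := by
  intro k v w mV u i mI digits hmv hwv
  rw [List.replicate_succ, List.cons_append, PySem.List.enumerate_cons]
  simp only [aGo]
  rw [if_pos (by omega)]
  exact aGo_run_eq k v w u (i + 1) i digits hwv

theorem fill9 : ∀ (t : List Int) (d : List Int) (p : Nat), p + t.length = d.length →
    (PySem.List.enumerate t (p : Int)).foldl (fun d iv => PySem.List.pySetD d iv.1 9) d
      = d.take p ++ List.replicate t.length 9 := by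
  intro t
  induction t with
  | nil =>
    intro d p hp
    simp only [List.length_nil] at hp
    simp only [PySem.List.enumerate_nil, List.foldl_nil, List.length_nil, List.replicate_zero,
      List.append_nil]
    rw [List.take_of_length_le (by omega)]
  | cons x t ih =>
    intro d p hp
    simp only [List.length_cons] at hp
    rw [PySem.List.enumerate_cons, List.foldl_cons]
    have e1 : ((p : Int) + 1) = ((p + 1 : Nat) : Int) := by omega
    have e2 : PySem.List.pySetD d (p : Int) 9 = d.set p 9 := PySem.List.pySetD_natCast d p 9
    rw [e1, e2, ih (d.set p 9) (p + 1) (by simp; omega)]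
    have hplen : p < d.length := by omega
    have e3 : (d.set p 9).take (p + 1) = d.take p ++ [9] := by
      rw [List.take_add_one, List.take_set_of_le (le_refl p)]
      congr 1
      simp [hplen]
    rw [e3, List.length_cons, List.append_assoc]
    congr 1

theorem getD_set_ne (l : List Int) (n q : Nat) (v : Int) (h : q ≠ n) :
    (l.set n v).getD q 0 = l.getD q 0 := by
  simp [List.getD_eq_getElem?_getD, List.getElem?_set, Ne.symm h]

theorem getD_set_le (l : List Int) (n : Nat) :
    (l.set n (l.getD n 0 - 1)).getD n 0 ≤ l.getD n 0 := by
  by_cases hl : n < l.length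
  · simp [List.getD_eq_getElem?_getD, List.getElem?_set, hl]
  · rw [List.set_eq_of_length_le (by omega)]

theorem phaseA (jn : Nat) : ∀ (L : List Int), (∀ i ∈ L, (jn : Int) < i) →
    ∀ (d : List Int) (mk : Int),
      (L.foldl bStep (d, mk)).1.length = d.length ∧
      (∀ p : Nat, p < jn → (L.foldl bStep (d, mk)).1.getD p 0 = d.getD p 0) ∧
      (L.foldl bStep (d, mk)).1.getD jn 0 ≤ d.getD jn 0 := by
  intro L
  induction L with
  | nil => intro _ d mk; exact ⟨rfl, fun p _ => rfl, le_refl _⟩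
  | cons i L ih =>
    intro hL d mk
    have hji : (jn : Int) < i := hL i List.mem_cons_self
    rw [List.foldl_cons, bStep_eq d mk i (by omega)]
    split_ifs with hc
    · have hjq : jn ≤ i.toNat - 1 := by omega
      obtain ⟨ih1, ih2, ih3⟩ := ih (fun x hx => hL x (List.mem_cons_of_mem _ hx))
        (d.set (i.toNat - 1) (d.getD (i.toNat - 1) 0 - 1)) i
      refine ⟨by rw [ih1, List.length_set], ?_, ?_⟩
      · intro p hp
        rw [ih2 p hp, getD_set_ne _ _ _ _ (by omega)]
      · by_cases hq : jn = i.toNat - 1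
        · exact le_trans ih3 (by rw [hq]; exact getD_set_le d (i.toNat - 1))
        · exact le_trans ih3 (le_of_eq (getD_set_ne _ _ _ _ hq))
    · exact ih (fun x hx => hL x (List.mem_cons_of_mem _ hx)) d mk

theorem getD_mid (a z : List Int) (r : Nat) (v : Int) (t : Nat) (ht : t < r) :
    (a ++ List.replicate r v ++ z).getD (a.length + t) 0 = v := by
  rw [List.append_assoc, List.getD_append_right _ _ _ _ (by omega), Nat.add_sub_cancel_left,
    List.getD_append _ _ _ _ (by simp [ht]), List.getD_replicate _ ht]

theorem getD_after (a mid z : List Int) :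
    (a ++ mid ++ z).getD (a.length + mid.length) 0 = z.getD 0 0 := by
  rw [List.append_assoc, List.getD_append_right _ _ _ _ (by omega), Nat.add_sub_cancel_left,
    List.getD_append_right _ _ _ _ (le_refl _), Nat.sub_self]

theorem set_mid (a z : List Int) (r : Nat) (v : Int) :
    (a ++ List.replicate (r + 1) v ++ z).set (a.length + r) (v - 1)
      = a ++ List.replicate r v ++ ((v - 1) :: z) := by
  rw [List.append_assoc, List.set_append_right _ _ (by omega), Nat.add_sub_cancel_left,
    List.replicate_succ', List.append_assoc, List.set_append_right _ _ (by simp),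
    List.length_replicate, Nat.sub_self]
  simp [List.set_cons_zero, List.append_assoc]

theorem phaseB : ∀ (k : Nat) (a z : List Int) (v mk : Int), z.getD 0 0 < v →
    (PySem.List.pyRange ((a.length + k + 1 : Nat) : Int) ((a.length : Nat) : Int) (-1)).foldl bStep
      (a ++ List.replicate (k + 1) v ++ z, mk)
    = (a ++ List.replicate (k + 1) (v - 1) ++ z, ((a.length + 1 : Nat) : Int)) := by
  intro k
  induction k with
  | zero =>
    intro a z v mk hz
    rw [PySem.List.pyRange_neg_one_cons (by push_cast; omega), List.foldl_cons,
      bStep_eq _ _ _ (by push_cast; omega)]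
    have e0 : ((a.length + 0 + 1 : Nat) : Int) - 1 = ((a.length : Nat) : Int) := by push_cast; omega
    rw [e0, PySem.List.pyRange_neg_one_eq_nil (le_refl _)]
    have e1 : ((a.length + 0 + 1 : Nat) : Int).toNat = a.length + 1 := by omega
    rw [e1]
    have e2 : a.length + 1 - 1 = a.length + 0 := by omega
    rw [e2]
    have g1 : (a ++ List.replicate (0 + 1) v ++ z).getD (a.length + 0) 0 = v :=
      getD_mid a z 1 v 0 (by omega)
    have g2 : (a ++ List.replicate (0 + 1) v ++ z).getD (a.length + 1) 0 = z.getD 0 0 := by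
      have := getD_after a (List.replicate (0 + 1) v) z
      simpa using this
    rw [if_pos (by rw [g1]; rw [show a.length + 1 = a.length + 0 + 1 by omega] at g2; rw [g2]; omega)]
    rw [g1, set_mid a z 0 v, List.foldl_nil]
    simp
  | succ kk ih =>
    intro a z v mk hz
    rw [PySem.List.pyRange_neg_one_cons (by push_cast; omega), List.foldl_cons,
      bStep_eq _ _ _ (by push_cast; omega)]
    have e1 : ((a.length + (kk + 1) + 1 : Nat) : Int).toNat = a.length + kk + 2 := by omega
    rw [e1]
    have e2 : a.length + kk + 2 - 1 = a.length + (kk + 1) := by omega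
    rw [e2]
    have g1 : (a ++ List.replicate (kk + 1 + 1) v ++ z).getD (a.length + (kk + 1)) 0 = v :=
      getD_mid a z (kk + 2) v (kk + 1) (by omega)
    have g2 : (a ++ List.replicate (kk + 1 + 1) v ++ z).getD (a.length + kk + 2) 0 = z.getD 0 0 := by
      have := getD_after a (List.replicate (kk + 1 + 1) v) z
      simp only [List.length_replicate] at this
      rw [show a.length + kk + 2 = a.length + (kk + 1 + 1) by omega]
      exact this
    rw [if_pos (by rw [g1, g2]; omega)]
    rw [g1, show (kk + 1 + 1) = (kk + 1) + 1 from rfl, set_mid a z (kk + 1) v]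
    have e3 : ((a.length + (kk + 1) + 1 : Nat) : Int) - 1 = ((a.length + kk + 1 : Nat) : Int) := by
      push_cast; omega
    rw [e3, ih a ((v - 1) :: z) v _ (by simp)]
    have estep : ∀ (n : Nat), List.replicate (n + 1) (v - 1) ++ z
        = List.replicate n (v - 1) ++ (v - 1) :: z := by
      intro n; rw [List.replicate_succ']; simp
    rw [List.append_assoc a, List.append_assoc a, estep (kk + 1)]

theorem decomp : ∀ ds : List Int, List.IsChain (· ≤ ·) ds ∨
    ∃ a k v w u, ds = a ++ List.replicate (k + 1) v ++ w :: u ∧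
      List.IsChain (· ≤ ·) a ∧ (∀ x ∈ a, x < v) ∧ w < v := by
  intro ds
  induction ds with
  | nil => left; simp
  | cons x t ih =>
    rcases ih with hch | ⟨a, k, v, w, u, heq, hcha, hav, hwv⟩
    · cases t with
      | nil => left; simp
      | cons y t' =>
        by_cases hxy : x ≤ y
        · left; exact List.isChain_cons_cons.mpr ⟨hxy, hch⟩
        · right; exact ⟨[], 0, x, y, t', by simp, by simp, by simp, by omega⟩
    · cases a with
      | nil =>
        simp only [List.nil_append] at heq
        rcases lt_trichotomy x v with h | h | h
        · right
          refine ⟨[x], k, v, w, u, by simp [heq], by simp, by simpa using h, hwv⟩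
        · right
          refine ⟨[], k + 1, v, w, u, ?_, by simp, by simp, hwv⟩
          subst h
          rw [heq, List.nil_append]
          simp [List.replicate_succ]
        · right
          refine ⟨[], 0, x, v, List.replicate k v ++ w :: u, ?_, by simp, by simp, h⟩
          rw [heq, List.replicate_succ, List.cons_append]
          simp
      | cons y a' =>
        by_cases hxy : x ≤ y
        · right
          refine ⟨x :: y :: a', k, v, w, u, by simp [heq],
            List.isChain_cons_cons.mpr ⟨hxy, hcha⟩, ?_, hwv⟩
          intro z hz
          rcases List.mem_cons.mp hz with h | h
          · have := hav y (by simp); omega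
          · exact hav z h
        · right
          refine ⟨[], 0, x, y, a' ++ List.replicate (k + 1) v ++ w :: u, ?_, by simp, by simp,
            by omega⟩
          simp [heq]

theorem dec_eq (a : List Int) (k : Nat) (v w : Int) (u : List Int) :
    decrementDigitsAtIdx (a ++ List.replicate (k + 1) v ++ w :: u) ((a.length : Nat) : Int)
      = renderDigits ((a ++ [v - 1]) ++ List.replicate (k + (u.length + 1)) 9) := by
  simp only [decrementDigitsAtIdx]
  have hg : PySem.List.pyGetD (a ++ List.replicate (k + 1) v ++ w :: u) ((a.length : Nat) : Int) 0
      = v := by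
    rw [PySem.List.pyGetD_natCast]
    have := getD_mid a (w :: u) (k + 1) v 0 (by omega)
    simpa using this
  have hset : PySem.List.pySetD (a ++ List.replicate (k + 1) v ++ w :: u) ((a.length : Nat) : Int)
      (v - 1) = (a ++ [v - 1]) ++ (List.replicate k v ++ w :: u) := by
    rw [PySem.List.pySetD_natCast, List.append_assoc, List.set_append_right _ _ (le_refl _),
      Nat.sub_self, List.replicate_succ, List.cons_append, List.set_cons_zero]
    simp
  rw [hg, hset]
  have hslice : PySem.List.slice ((a ++ [v - 1]) ++ (List.replicate k v ++ w :: u))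
      (some (((a.length : Nat) : Int) + 1)) none = List.replicate k v ++ w :: u := by
    rw [show ((a.length : Nat) : Int) + 1 = ((a.length + 1 : Nat) : Int) by push_cast; omega,
      PySem.List.slice_from_natCast, show a.length + 1 = (a ++ [v - 1]).length by simp]
    exact List.drop_left
  rw [hslice,
    show ((a.length : Nat) : Int) + 1 = ((a.length + 1 : Nat) : Int) by push_cast; omega,
    fill9 _ _ _ (by simp; omega),
    show a.length + 1 = (a ++ [v - 1]).length by simp, List.take_left]
  congr 2
  simp

theorem A_descent (a : List Int) (k : Nat) (v w : Int) (u : List Int)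
    (hcha : List.IsChain (· ≤ ·) a) (hav : ∀ x ∈ a, x < v) (hwv : w < v) (hv : 0 ≤ v)
    (hnn : ∀ x ∈ a, 0 ≤ x) :
    aGo (PySem.List.enumerate (a ++ List.replicate (k + 1) v ++ w :: u) 0) (-1) (-1)
        (a ++ List.replicate (k + 1) v ++ w :: u)
      = some (decrementDigitsAtIdx (a ++ List.replicate (k + 1) v ++ w :: u)
          ((a.length : Nat) : Int)) := by
  have hch : List.IsChain (· ≤ ·) ((-1 : Int) :: a) := by
    cases a with
    | nil => simp
    | cons y t => exact List.isChain_cons_cons.mpr ⟨by have := hnn y (by simp); omega, hcha⟩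
  rw [List.append_assoc, PySem.List.enumerate_append]
  obtain ⟨mV', mI', heq, hmem⟩ := aGo_prefix a 0 (-1) (-1) _ _ hch
  rw [heq]
  have hlt : mV' < v := by
    rcases List.mem_cons.mp hmem with h | h
    · omega
    · exact hav mV' h
  rw [aGo_run k v w mV' u _ mI' _ hlt hwv]
  norm_num

theorem B_descent (a : List Int) (k : Nat) (v w : Int) (u : List Int)
    (hcha : List.IsChain (· ≤ ·) a) (hav : ∀ x ∈ a, x < v) (hwv : w < v) :
    ∃ z : List Int,
      (PySem.List.pyRange (((a ++ List.replicate (k + 1) v ++ w :: u).length : Int) - 1) 0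
            (-1)).foldl bStep (a ++ List.replicate (k + 1) v ++ w :: u,
            ((a ++ List.replicate (k + 1) v ++ w :: u).length : Int))
        = (a ++ List.replicate (k + 1) (v - 1) ++ z, ((a.length + 1 : Nat) : Int)) ∧
      z.length = u.length + 1 := by
  set ds := a ++ List.replicate (k + 1) v ++ w :: u with hds
  have hlen : ds.length = a.length + k + 1 + (u.length + 1) := by simp [hds]; omega
  rw [show ((ds.length : Int) - 1) = ((ds.length - 1 : Nat) : Int) by omega,
    pyRange_neg_one_append _ ((a.length + k + 1 : Nat) : Int) 0 (by push_cast; omega)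
      (by push_cast; omega),
    List.foldl_append]
  obtain ⟨hA1, hA2, hA3⟩ := phaseA (a.length + k + 1)
    (PySem.List.pyRange ((ds.length - 1 : Nat) : Int) ((a.length + k + 1 : Nat) : Int) (-1))
    (fun i hi => (PySem.List.mem_pyRange_neg_one.mp hi).1) ds (ds.length : Int)
  set r1 := (PySem.List.pyRange ((ds.length - 1 : Nat) : Int) ((a.length + k + 1 : Nat) : Int)
      (-1)).foldl bStep (ds, (ds.length : Int)) with hr1
  have htake : r1.1.take (a.length + k + 1) = a ++ List.replicate (k + 1) v := by
    apply List.ext_getElem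
    · rw [List.length_take, hA1, hlen]; simp; omega
    · intro q h1 h2
      have hq : q < a.length + k + 1 := by
        rw [List.length_take, hA1, hlen] at h1; omega
      rw [List.getElem_take]
      have hql : q < r1.1.length := by rw [hA1, hlen]; omega
      have hqr : q < (a ++ List.replicate (k + 1) v).length := by simp; omega
      rw [← List.getD_eq_getElem r1.1 0 hql, ← List.getD_eq_getElem _ 0 hqr, hA2 q hq, hds,
        List.getD_append _ _ _ _ (by simp; omega)]
  have hzsplit : r1.1 = a ++ List.replicate (k + 1) v ++ r1.1.drop (a.length + k + 1) := by
    conv_lhs => rw [← List.take_append_drop (a.length + k + 1) r1.1]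
    rw [htake]
  set z := r1.1.drop (a.length + k + 1) with hzdef
  have hzlen : z.length = u.length + 1 := by
    rw [hzdef, List.length_drop, hA1, hlen]; omega
  have hz0 : z.getD 0 0 < v := by
    have e1 : r1.1.getD (a.length + k + 1) 0 = z.getD 0 0 := by
      conv_lhs => rw [hzsplit]
      rw [List.getD_append_right _ _ _ _ (by simp; omega)]
      congr 1
      simp
    have e2 : ds.getD (a.length + k + 1) 0 = w := by
      have e2' := getD_after a (List.replicate (k + 1) v) (w :: u)
      simp only [List.length_replicate, List.getD_cons_zero] at e2'
      rw [hds, show a.length + k + 1 = a.length + (k + 1) by omega]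
      exact e2'
    have := hA3
    rw [e1, e2] at *
    omega
  rw [show r1 = (a ++ List.replicate (k + 1) v ++ z, r1.2) from by
    rw [← hzsplit]]
  rw [pyRange_neg_one_append _ ((a.length : Nat) : Int) 0 (by push_cast; omega)
    (by push_cast; omega), List.foldl_append, phaseB k a z v r1.2 hz0]
  rw [phaseC a.length (a ++ List.replicate (k + 1) (v - 1) ++ z) _ ?_]
  · exact ⟨z, rfl, hzlen⟩
  · intro q hq
    have hgq : (a ++ List.replicate (k + 1) (v - 1) ++ z).getD q 0 = a.getD q 0 := by
      rw [List.getD_append _ _ _ _ (by simp; omega), List.getD_append _ _ _ _ (by omega)]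
    rcases Nat.lt_or_ge (q + 1) a.length with h1 | h1
    · have hgq1 : (a ++ List.replicate (k + 1) (v - 1) ++ z).getD (q + 1) 0 = a.getD (q + 1) 0 := by
        rw [List.getD_append _ _ _ _ (by simp; omega), List.getD_append _ _ _ _ (by omega)]
      rw [hgq, hgq1]
      exact chain'_getD a hcha q h1
    · have hq1 : q + 1 = a.length := by omega
      have hgq1 : (a ++ List.replicate (k + 1) (v - 1) ++ z).getD (q + 1) 0 = v - 1 := by
        rw [hq1]
        have := getD_mid a z (k + 1) (v - 1) 0 (by omega)
        simpa using this
      rw [hgq, hgq1]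
      have hmem : a.getD q 0 ∈ a := by
        rw [List.getD_eq_getElem a 0 (by omega)]
        exact List.getElem_mem _
      have := hav _ hmem
      omega

theorem pyDigit_nonneg (c : Char) (h : c.isDigit = true) : 0 ≤ pyDigit c := by
  have hb : 48 ≤ c.toNat ∧ c.toNat ≤ 57 := by
    simp [Char.isDigit, UInt32.le_iff_toNat_le] at h
    exact ⟨h.1, h.2⟩
  obtain ⟨h1, h2⟩ := hb
  have hofn := Char.ofNat_toNat c
  set n := c.toNat with hn
  rw [← hofn]
  interval_cases n <;> decide

theorem B_tidy (ds : List Int) (hch : List.IsChain (· ≤ ·) ds) :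
    (PySem.List.pyRange ((ds.length : Int) - 1) 0 (-1)).foldl bStep (ds, (ds.length : Int))
      = (ds, (ds.length : Int)) := by
  cases hlen : ds.length with
  | zero =>
    rw [PySem.List.pyRange_neg_one_eq_nil (by norm_num)]
    rfl
  | succ p =>
    rw [show ((p + 1 : Nat) : Int) - 1 = ((p : Nat) : Int) by push_cast; omega]
    exact phaseC p ds _ (fun q hq => chain'_getD ds hch q (by omega))

theorem main_equiv (s : String) (hpre : ∀ c ∈ s.toList, c.isDigit = true) :
    greatestTidyNumberLte s = greatestTidyNumberLte_alt s := by
  have hnn : ∀ x ∈ s.toList.map pyDigit, 0 ≤ x := by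
    intro x hx
    obtain ⟨c, hc, rfl⟩ := List.mem_map.mp hx
    exact pyDigit_nonneg c (hpre c hc)
  simp only [greatestTidyNumberLte, greatestTidyNumberLte_alt]
  set ds := s.toList.map pyDigit with hds
  rcases decomp ds with hch | ⟨a, k, v, w, u, hdseq, hcha, hav, hwv⟩
  · have hchm : List.IsChain (· ≤ ·) ((-1 : Int) :: ds) := by
      cases hd : ds with
      | nil => simp
      | cons y t =>
        exact List.isChain_cons_cons.mpr ⟨by have := hnn y (by rw [hd]; simp); omega,
          hd ▸ hch⟩
    rw [aGo_no_descent ds 0 (-1) (-1) ds hchm, B_tidy ds hch]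
    simp
  · have hva : 0 ≤ v := hnn v (by rw [hdseq]; simp [List.mem_replicate])
    have hnna : ∀ x ∈ a, 0 ≤ x := fun x hx => hnn x (by rw [hdseq]; simp [hx])
    rw [hdseq, A_descent a k v w u hcha hav hwv hva hnna]
    obtain ⟨z, hB, hzlen⟩ := B_descent a k v w u hcha hav hwv
    rw [hB, dec_eq a k v w u]
    have hlen2 : (a ++ List.replicate (k + 1) v ++ w :: u).length
        = a.length + k + 1 + (u.length + 1) := by simp; omega
    rw [if_neg (by rw [hlen2]; push_cast; omega)]
    show renderDigits _ = renderDigits _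
    have hslice : PySem.List.slice (a ++ List.replicate (k + 1) (v - 1) ++ z) none
        (some ((a.length + 1 : Nat) : Int)) = a ++ [v - 1] := by
      rw [PySem.List.slice_to_natCast, List.take_append, List.take_append,
        List.take_of_length_le (by omega), List.replicate_succ, Nat.add_sub_cancel_left,
        List.take_succ_cons, List.take_zero]
      simp
    have hcnt : ((((a ++ List.replicate (k + 1) v ++ w :: u).length : Nat) : Int)
        - ((a.length + 1 : Nat) : Int)).toNat = k + (u.length + 1) := by
      rw [hlen2]; omega
    rw [hslice, hcnt]

-- ===== VERDICT (by name: the statement is the Claim_ definition above) =====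
theorem greatestTidyNumberLte_spec : Claim_equal_greatestTidyNumberLte := by
  intro s _ hpre
  unfold Spec_greatestTidyNumberLte
  unfold Pre_greatestTidyNumberLte at hpre
  exact main_equiv s (by simpa [List.all_eq_true] using hpre)
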